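-- pv_equiv track=rewrite | github.com/emilyantosch/distributed_systems | task4/server.py | get_binary_representation
-- ===== SOURCE A (Python) =====
-- def get_binary_representation(x: int) -> list[int]:
--     """
--     Extract the binary representation of x as a list of bits.
--
--     Input: x > 0 integer
--     Output: list x0, x1, ..., x_{l-1} where xi are the bits
--     """
--     if x <= 0:
--         raise ValueError("x must be a positive integer")
--
--     bits = []
--     s = x
--     while s > 0:
--         xi = s % 2  # 0 or 1 for even or odd
--         bits.append(xi)
--         s = (s - xi) // 2  # integer division without remainder
--
--     return bits  # bits[0] is LSB, bits[-1] is MSB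
-- ===== SOURCE B (Python) =====
-- def get_binary_representation(x: int) -> list[int]:
--     """
--     Extract the binary representation of x as a list of bits.
--
--     Input: x > 0 integer
--     Output: list x0, x1, ..., x_{l-1} where xi are the bits (LSB first)
--     """
--     if x <= 0:
--         raise ValueError("x must be a positive integer")
--
--     return [(x >> i) & 1 for i in range(x.bit_length())]
-- ===== Notes on version B (the rewrite author's own statement) =====
-- stated objective: alternative
-- what changed: Replaces the destructive remainder/division loop with a comprehension that indexes each bit directly via shift-and-mask over range(x.bit_length()).
import Mathlib
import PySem

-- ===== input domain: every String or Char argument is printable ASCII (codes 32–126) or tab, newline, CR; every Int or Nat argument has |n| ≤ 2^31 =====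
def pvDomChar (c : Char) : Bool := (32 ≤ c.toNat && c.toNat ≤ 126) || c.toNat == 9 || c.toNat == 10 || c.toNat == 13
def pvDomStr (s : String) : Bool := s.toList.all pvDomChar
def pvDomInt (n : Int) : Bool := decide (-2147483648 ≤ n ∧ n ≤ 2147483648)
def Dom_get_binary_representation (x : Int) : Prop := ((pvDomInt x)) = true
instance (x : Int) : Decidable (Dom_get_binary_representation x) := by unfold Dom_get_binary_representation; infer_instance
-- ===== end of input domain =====

-- B replaces A's remainder/division accumulator loop by directly indexing each bit
-- with shift-and-mask over range(x.bit_length()); alternative algorithm, similar cost.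

-- ===== PORT A =====
-- the 'while s > 0' loop of A, carrying the accumulated bits
def pvLoopA (s : Int) (bits : List Int) : List Int :=
  if 0 < s then
    let xi := PySem.Int.mod s 2
    pvLoopA (PySem.Int.floordiv (s - xi) 2) (bits ++ [xi])
  else bits
termination_by s.toNat
decreasing_by
  simp only [PySem.Int.mod_eq_emod_of_pos (a := s) (by omega : (0:Int) < 2),
    PySem.Int.floordiv_eq_ediv_of_pos (by omega : (0:Int) < 2)]
  omega

def get_binary_representation (x : Int) : List Int :=
  if x ≤ 0 then []  -- Python raises ValueError here; excluded by Pre_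
  else pvLoopA x []

-- ===== PORT B =====
def get_binary_representation_alt (x : Int) : List Int :=
  if x ≤ 0 then []  -- Python raises ValueError here; excluded by Pre_
  else (PySem.List.pyRange 0 (PySem.Int.bitLength x : Int) 1).map
         (fun i => PySem.Int.band (x >>> i.toNat) 1)

-- ===== PRECONDITION & SPEC =====
-- A raises ValueError exactly when x <= 0
def Pre_get_binary_representation (x : Int) : Prop := 0 < x
instance (x : Int) : Decidable (Pre_get_binary_representation x) := by unfold Pre_get_binary_representation; infer_instance
def pvWitness_get_binary_representation : Int := (13)

def Spec_get_binary_representation (x : Int) (out : List Int) : Prop := out = get_binary_representation_alt x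
instance (x : Int) (out : List Int) : Decidable (Spec_get_binary_representation x out) := by unfold Spec_get_binary_representation; infer_instance

-- ===== CLAIM (what is proved, stated in full; the proofs are below) =====
def Claim_equal_get_binary_representation : Prop := ∀ (x : Int), Dom_get_binary_representation x → Pre_get_binary_representation x → Spec_get_binary_representation x (get_binary_representation x)

-- ===== LEMMAS AND PROOFS =====

-- LSB-first bit list on Nat: the common value of both programs
def pvBits (m : Nat) : List Nat :=
  if 0 < m then m % 2 :: pvBits (m / 2) else []
decreasing_by omega

lemma pvLoopA_eq (m : Nat) : ∀ (bits : List Int),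
    pvLoopA (m : Int) bits = bits ++ (pvBits m).map (Int.ofNat) := by
  induction m using Nat.strong_induction_on with
  | _ m ih =>
    intro bits
    rw [pvLoopA, pvBits]
    by_cases hm : 0 < m
    · rw [if_pos (by exact_mod_cast hm : (0:Int) < (m:Int)), if_pos hm]
      have hmod : PySem.Int.mod (m : Int) 2 = ((m % 2 : Nat) : Int) := by
        exact_mod_cast PySem.Int.mod_natCast m 2
      have hdiv : PySem.Int.floordiv ((m : Int) - ((m % 2 : Nat) : Int)) 2 = ((m / 2 : Nat) : Int) := by
        rw [PySem.Int.floordiv_eq_ediv_of_pos (by omega)]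
        omega
      rw [hmod]
      show pvLoopA (PySem.Int.floordiv ((m:Int) - ((m % 2 : Nat) : Int)) 2) (bits ++ [((m % 2 : Nat) : Int)]) = _
      rw [hdiv, ih (m / 2) (by omega)]
      simp
    · rw [if_neg (by omega : ¬ (0:Int) < (m:Int)), if_neg hm]
      simp

lemma pvShift_natCast (m : Nat) (k : Nat) : (m : Int) >>> (k : Int) = ((m >>> k : Nat) : Int) := by
  simp

lemma pvBitsB_eq (m : Nat) (hm : 0 < m) :
    (List.range (PySem.Int.bitLength (m : Int))).map (fun i => ((m >>> i) &&& 1 : Nat)) = pvBits m := by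
  induction m using Nat.strong_induction_on with
  | _ m ih =>
    rw [pvBits, if_pos hm, PySem.Int.bitLength_natCast hm, List.range_succ_eq_map]
    simp only [List.map_cons, List.map_map]
    refine congrArg₂ _ ?_ ?_
    · simp [Nat.and_one_is_mod m]
    · by_cases h2 : 0 < m / 2
      · rw [← ih (m / 2) (by omega) h2]
        refine List.map_congr_left fun i _ => ?_
        simp [Function.comp, Nat.shiftRight_eq_div_pow, Nat.div_div_eq_div_mul, pow_succ']
      · rw [show m / 2 = 0 by omega, pvBits]
        simp [PySem.Int.bitLength_zero]

lemma pvAlt_eq (x : Int) (hx : 0 < x) :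
    get_binary_representation_alt x = (pvBits x.toNat).map Int.ofNat := by
  obtain ⟨m, rfl⟩ : ∃ m : Nat, x = (m : Int) := ⟨x.toNat, by omega⟩
  have hm : 0 < m := by exact_mod_cast hx
  rw [Int.toNat_natCast]
  rw [get_binary_representation_alt, if_neg (by omega), PySem.List.pyRange_zero_natCast,
    List.map_map, ← pvBitsB_eq m hm, List.map_map]
  refine List.map_congr_left fun i _ => ?_
  simp only [Function.comp_apply, Int.toNat_natCast]
  rw [pvShift_natCast m i]
  exact_mod_cast PySem.Int.band_natCast (m >>> i) 1


theorem get_binary_representation_spec : Claim_equal_get_binary_representation := by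
  intro x _ hx
  have hx' : (0:Int) < x := hx
  unfold Spec_get_binary_representation
  rw [pvAlt_eq x hx']
  obtain ⟨m, rfl⟩ : ∃ m : Nat, x = (m : Int) := ⟨x.toNat, by omega⟩
  rw [get_binary_representation, if_neg (by omega), pvLoopA_eq, Int.toNat_natCast]
  simp
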